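-- pv_equiv track=rewrite | github.com/yasufumi-nakata/Pytra | src/toolchain2/compile/passes.py | _split_union_members
-- ===== SOURCE A (Python) =====
-- def _split_union_members(type_name: str) -> list[str]:
--     parts: list[str] = []
--     cur = ""
--     depth = 0
--     for ch in type_name:
--         if ch == "[":
--             depth += 1
--             cur += ch
--         elif ch == "]":
--             if depth > 0:
--                 depth -= 1
--             cur += ch
--         elif ch == "|" and depth == 0:
--             part = cur.strip()
--             if part != "":
--                 parts.append(part)
--             cur = ""
--         else:
--             cur += ch
--     tail = cur.strip()
--     if tail != "":
--         parts.append(tail)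
--     return parts
-- ===== SOURCE B (Python) =====
-- def _split_union_members(type_name: str) -> list[str]:
--     def first_top_pipe(s: str) -> int:
--         depth = 0
--         for i, ch in enumerate(s):
--             if ch == "[":
--                 depth += 1
--             elif ch == "]":
--                 if depth > 0:
--                     depth -= 1
--             elif ch == "|" and depth == 0:
--                 return i
--         return -1
--
--     parts: list[str] = []
--     rest = type_name
--     while (i := first_top_pipe(rest)) != -1:
--         seg = rest[:i].strip()
--         if seg:
--             parts.append(seg)
--         rest = rest[i + 1:]
--     tail = rest.strip()
--     if tail:
--         parts.append(tail)
--     return parts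
-- ===== Notes on version B (the rewrite author's own statement) =====
-- stated objective: alternative
-- what changed: Replaces A's single-pass character accumulator (cur/parts/depth fold) with a find-then-slice decomposition: repeatedly locate the first top-level pipe and cut the string there by slicing, stripping each slice.
import Mathlib
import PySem

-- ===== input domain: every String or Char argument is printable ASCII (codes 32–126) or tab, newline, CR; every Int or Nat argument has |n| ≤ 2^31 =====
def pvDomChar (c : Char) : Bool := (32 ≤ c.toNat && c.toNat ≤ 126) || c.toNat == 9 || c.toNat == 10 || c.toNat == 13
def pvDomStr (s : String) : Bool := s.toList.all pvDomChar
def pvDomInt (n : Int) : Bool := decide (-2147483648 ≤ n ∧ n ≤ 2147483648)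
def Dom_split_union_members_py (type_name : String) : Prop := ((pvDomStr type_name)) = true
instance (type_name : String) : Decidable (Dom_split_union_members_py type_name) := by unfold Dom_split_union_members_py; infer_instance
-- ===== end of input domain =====

-- B differs from A by decomposition only: repeatedly find the first top-level '|' and slice there,
-- instead of A's single pass accumulating the current segment character by character.

-- ===== PORT A =====
-- one loop step of A: state (parts, cur, depth)
def pvAStep (st : List (List Char) × List Char × Int) (c : Char) :
    List (List Char) × List Char × Int :=
  let (parts, cur, depth) := st
  if c = '[' then (parts, cur ++ [c], depth + 1)
  else if c = ']' then (parts, cur ++ [c], if depth > 0 then depth - 1 else depth)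
  else if c = '|' ∧ depth = 0 then
    (if PySem.Chars.strip cur ≠ [] then parts ++ [PySem.Chars.strip cur] else parts, [], depth)
  else (parts, cur ++ [c], depth)

def split_union_members_py (type_name : String) : List String :=
  let st := type_name.toList.foldl pvAStep ([], [], 0)
  let tail := PySem.Chars.strip st.2.1
  (if tail ≠ [] then st.1 ++ [tail] else st.1).map String.ofList

-- ===== PORT B =====
-- B's helper first_top_pipe: index of the first pipe at bracket depth 0, -1 if none
def pvBFind (depth : Int) (i : Int) : List Char → Int
  | [] => -1
  | c :: cs =>
    if c = '[' then pvBFind (depth + 1) (i + 1) cs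
    else if c = ']' then pvBFind (if depth > 0 then depth - 1 else depth) (i + 1) cs
    else if c = '|' ∧ depth = 0 then i
    else pvBFind depth (i + 1) cs

-- proof-side normal form of pvBFind, used here only for the termination argument
def pvBFindN (depth : Int) : List Char → Option Nat
  | [] => none
  | c :: cs =>
    if c = '[' then (pvBFindN (depth + 1) cs).map (· + 1)
    else if c = ']' then (pvBFindN (if depth > 0 then depth - 1 else depth) cs).map (· + 1)
    else if c = '|' ∧ depth = 0 then some 0
    else (pvBFindN depth cs).map (· + 1)

theorem pvBFind_eq (cs : List Char) : ∀ (d i : Int),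
    pvBFind d i cs = (pvBFindN d cs).elim (-1) (fun p => i + (p : Int)) := by
  induction cs with
  | nil => intro d i; rfl
  | cons c cs ih =>
    intro d i
    simp only [pvBFind, pvBFindN]
    split_ifs with h1 h2 h3 <;>
      first
        | (rw [ih]; cases pvBFindN _ cs <;> (simp; try ring))
        | simp

theorem pvBFindN_lt (cs : List Char) : ∀ (d : Int) (p : Nat),
    pvBFindN d cs = some p → p < cs.length := by
  induction cs with
  | nil => intro d p h; simp [pvBFindN] at h
  | cons c cs ih =>
    intro d p h
    simp only [pvBFindN] at h
    split_ifs at h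
    all_goals first
      | (simp only [Option.some.injEq] at h; simp only [List.length_cons]; omega)
      | (obtain ⟨q, hq, hpq⟩ := Option.map_eq_some_iff.mp h
         have := ih _ _ hq; simp only [List.length_cons]; omega)

-- B's main loop: cut at the first top-level pipe, recurse on the remainder
def pvBLoop (parts : List (List Char)) (rest : List Char) : List (List Char) :=
  if hne : pvBFind 0 0 rest ≠ -1 then
    let seg := PySem.Chars.strip (PySem.List.slice rest none (some (pvBFind 0 0 rest)))
    pvBLoop (if seg ≠ [] then parts ++ [seg] else parts)
            (PySem.List.slice rest (some (pvBFind 0 0 rest + 1)) none)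
  else
    let tail := PySem.Chars.strip rest
    if tail ≠ [] then parts ++ [tail] else parts
termination_by rest.length
decreasing_by
  rw [pvBFind_eq] at hne ⊢
  cases hp : pvBFindN 0 rest with
  | none => rw [hp] at hne; simp at hne
  | some p =>
    have hlt := pvBFindN_lt rest 0 p hp
    simp only [Option.elim]
    rw [show ((0 : Int) + (p : Int) + 1) = ((p + 1 : Nat) : Int) by push_cast; ring,
        PySem.List.slice_from rest (by positivity), Int.toNat_natCast]
    simp only [List.length_drop]; omega

def split_union_members_py_alt (type_name : String) : List String :=
  (pvBLoop [] type_name.toList).map String.ofList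

-- ===== PRECONDITION & SPEC =====
def Spec_split_union_members_py (type_name : String) (out : List String) : Prop := out = split_union_members_py_alt type_name
instance (type_name : String) (out : List String) : Decidable (Spec_split_union_members_py type_name out) := by unfold Spec_split_union_members_py; infer_instance

-- ===== CLAIM (what is proved, stated in full; the proofs are below) =====
def Claim_equal_split_union_members_py : Prop := ∀ (type_name : String), Dom_split_union_members_py type_name → Spec_split_union_members_py type_name (split_union_members_py type_name)

-- ===== LEMMAS AND PROOFS =====

-- prepend a prefix onto the first segment
def pvPreH (cur : List Char) : List (List Char) → List (List Char)
  | [] => [cur]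
  | s :: ss => (cur ++ s) :: ss

-- segments of cs split at top-level pipes, starting at bracket depth d
def pvSegs (d : Int) : List Char → List (List Char)
  | [] => [[]]
  | c :: cs =>
    if c = '[' then pvPreH [c] (pvSegs (d + 1) cs)
    else if c = ']' then pvPreH [c] (pvSegs (if d > 0 then d - 1 else d) cs)
    else if c = '|' ∧ d = 0 then [] :: pvSegs 0 cs
    else pvPreH [c] (pvSegs d cs)

-- strip each segment, keep the non-empty ones
def pvRender (xs : List (List Char)) : List (List Char) :=
  xs.flatMap (fun s => if PySem.Chars.strip s ≠ [] then [PySem.Chars.strip s] else [])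

theorem pvPreH_preH (cur : List Char) (c : Char) (xs : List (List Char)) :
    pvPreH cur (pvPreH [c] xs) = pvPreH (cur ++ [c]) xs := by
  cases xs <;> simp [pvPreH]

theorem pvSegs_ne_nil (cs : List Char) (d : Int) : pvSegs d cs ≠ [] := by
  cases cs
  · simp [pvSegs]
  · simp only [pvSegs]
    split_ifs <;> (cases h : pvSegs _ _ <;> simp [pvPreH])

theorem pvPreH_nil (xs : List (List Char)) (h : xs ≠ []) : pvPreH [] xs = xs := by
  cases xs <;> simp_all [pvPreH]

def pvFinal (st : List (List Char) × List Char × Int) : List (List Char) :=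
  if PySem.Chars.strip st.2.1 ≠ [] then st.1 ++ [PySem.Chars.strip st.2.1] else st.1

theorem pvA_loop (cs : List Char) : ∀ (parts : List (List Char)) (cur : List Char) (d : Int),
    pvFinal (cs.foldl pvAStep (parts, cur, d)) = parts ++ pvRender (pvPreH cur (pvSegs d cs)) := by
  induction cs with
  | nil =>
    intro parts cur d
    simp only [List.foldl_nil, pvFinal, pvSegs, pvPreH, List.append_nil, pvRender,
      List.flatMap_cons, List.flatMap_nil]
    split_ifs <;> simp
  | cons c cs ih =>
    intro parts cur d
    by_cases h1 : c = '['
    · simp only [List.foldl_cons, pvAStep, pvSegs, if_pos h1]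
      rw [ih, pvPreH_preH]
    · by_cases h2 : c = ']'
      · simp only [List.foldl_cons, pvAStep, pvSegs, if_neg h1, if_pos h2]
        rw [ih, pvPreH_preH]
      · by_cases h3 : c = '|' ∧ d = 0
        · obtain ⟨hc, hd⟩ := h3
          simp only [List.foldl_cons, pvAStep, pvSegs, if_neg h1, if_neg h2,
            if_pos (show c = '|' ∧ d = 0 from ⟨hc, hd⟩)]
          rw [hd, ih, pvPreH_nil _ (pvSegs_ne_nil _ _)]
          simp only [pvPreH, List.append_nil, pvRender, List.flatMap_cons]
          split_ifs <;> simp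
        · simp only [List.foldl_cons, pvAStep, pvSegs, if_neg h1, if_neg h2, if_neg h3]
          rw [ih, pvPreH_preH]

theorem pvSegs_cut (cs : List Char) : ∀ (d : Int),
    pvSegs d cs = (pvBFindN d cs).elim [cs]
      (fun p => cs.take p :: pvSegs 0 (cs.drop (p + 1))) := by
  induction cs with
  | nil => intro d; rfl
  | cons c cs ih =>
    intro d
    by_cases h1 : c = '['
    · simp only [pvSegs, pvBFindN, if_pos h1]
      rw [ih]; cases pvBFindN (d + 1) cs <;> simp [pvPreH]
    · by_cases h2 : c = ']'
      · simp only [pvSegs, pvBFindN, if_neg h1, if_pos h2]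
        rw [ih]; cases pvBFindN (if d > 0 then d - 1 else d) cs <;> simp [pvPreH]
      · by_cases h3 : c = '|' ∧ d = 0
        · simp only [pvSegs, pvBFindN, if_neg h1, if_neg h2, if_pos h3]
          simp
        · simp only [pvSegs, pvBFindN, if_neg h1, if_neg h2, if_neg h3]
          rw [ih]; cases pvBFindN d cs <;> simp [pvPreH]

theorem pvB_loop (n : Nat) : ∀ (rest : List Char), rest.length ≤ n →
    ∀ (parts : List (List Char)), pvBLoop parts rest = parts ++ pvRender (pvSegs 0 rest) := by
  induction n with
  | zero =>
    intro rest hlen parts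
    have : rest = [] := by cases rest <;> simp_all
    subst this
    rw [pvBLoop]
    simp only [pvBFind, ne_eq, not_true_eq_false, dite_false, pvSegs, pvRender,
      List.flatMap_cons, List.flatMap_nil, List.append_nil]
    split_ifs <;> simp
  | succ n ih =>
    intro rest hlen parts
    rw [pvBLoop, pvSegs_cut]
    cases hp : pvBFindN 0 rest with
    | none =>
      rw [dif_neg (by rw [pvBFind_eq, hp]; simp)]
      simp only [Option.elim, pvRender, List.flatMap_cons, List.flatMap_nil, List.append_nil]
      split_ifs <;> simp
    | some p =>
      have hlt := pvBFindN_lt rest 0 p hp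
      rw [dif_pos (by rw [pvBFind_eq, hp]; simp only [Option.elim]; omega)]
      simp only [pvBFind_eq, hp, Option.elim]
      have e2 : ((0 : Int) + (p : Int) + 1) = ((p + 1 : Nat) : Int) := by push_cast; ring
      have e1 : ((0 : Int) + (p : Int)) = ((p : Nat) : Int) := by simp
      rw [e2, e1, PySem.List.slice_to rest (by positivity),
          PySem.List.slice_from rest (by positivity), Int.toNat_natCast, Int.toNat_natCast]
      rw [ih (rest.drop (p + 1)) (by simp [List.length_drop]; omega)]
      simp only [pvRender, List.flatMap_cons]
      split_ifs <;> simp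

-- ===== VERDICT (by name: the statement is the Claim_ definition above) =====
theorem split_union_members_py_spec : Claim_equal_split_union_members_py := by
  intro s _
  show split_union_members_py s = split_union_members_py_alt s
  unfold split_union_members_py split_union_members_py_alt
  rw [pvB_loop s.toList.length s.toList le_rfl []]
  change (pvFinal (s.toList.foldl pvAStep ([], [], 0))).map String.ofList = _
  rw [pvA_loop s.toList [] [] 0, pvPreH_nil _ (pvSegs_ne_nil _ _)]
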